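-- pv_equiv track=rewrite | github.com/david-ramsden/bastok | bastok.py | _build_rev
-- ===== SOURCE A (Python) =====
-- def _build_rev(table):
--     """Build reverse lookup sorted longest-first, deduplicating by first occurrence."""
--     pairs = sorted(table.items(), key=lambda kv: len(kv[1]), reverse=True)
--     seen = set()
--     out = []
--     for tok, name in pairs:
--         if name not in seen:
--             seen.add(name)
--             out.append((name, tok))
--     return out
-- ===== SOURCE B (Python) =====
-- def _build_rev(table):
--     """Build reverse lookup sorted longest-first, deduplicating by first occurrence."""
--     rev = {}
--     for tok, name in table.items():
--         rev.setdefault(name, tok)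
--     return sorted(rev.items(), key=lambda nt: len(nt[0]), reverse=True)
-- ===== Notes on version B (the rewrite author's own statement) =====
-- stated objective: idiomatic
-- what changed: A sorts all items longest-first and then deduplicates with a seen-set while scanning the sorted list; B reverses the two phases: it deduplicates first by building a name->token dict with setdefault in original item order, then sorts only the deduplicated items, relying on dict insertion order plus sort stability for the exact tie order.
import Mathlib
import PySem

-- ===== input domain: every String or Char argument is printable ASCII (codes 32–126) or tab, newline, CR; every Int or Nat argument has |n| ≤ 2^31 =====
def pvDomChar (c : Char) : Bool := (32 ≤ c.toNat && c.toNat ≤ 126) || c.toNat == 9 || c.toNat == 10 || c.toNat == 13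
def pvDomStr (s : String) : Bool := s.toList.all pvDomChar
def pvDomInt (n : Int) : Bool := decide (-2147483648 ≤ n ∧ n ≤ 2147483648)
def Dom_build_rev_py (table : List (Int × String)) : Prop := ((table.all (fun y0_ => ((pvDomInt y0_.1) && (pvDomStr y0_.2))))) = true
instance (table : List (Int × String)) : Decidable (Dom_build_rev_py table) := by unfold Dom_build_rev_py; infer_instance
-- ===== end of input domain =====

-- B swaps A's two phases: it deduplicates by name first (dict.setdefault over the original
-- item order) and only then sorts the deduplicated items longest-first; sort stability plus
-- dict insertion order gives exactly A's output (alternative decomposition, same cost).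

-- ===== PORT A =====
def build_rev_py (table : List (Int × String)) : List (String × Int) :=
  let pairs := PySem.List.sorted (PySem.Dict.ofList table).items (fun kv => PySem.Str.len kv.2) true
  (pairs.foldl
    (fun (st : PySem.Set String × List (String × Int)) kv =>
      if PySem.Set.contains st.1 kv.2 then st
      else (PySem.Set.add st.1 kv.2, st.2 ++ [(kv.2, kv.1)]))
    (PySem.Set.empty, [])).2

-- ===== PORT B =====
def build_rev_py_alt (table : List (Int × String)) : List (String × Int) :=
  let rev := (PySem.Dict.ofList table).items.foldl
    (fun (d : PySem.Dict String Int) kv => d.setdefault kv.2 kv.1) PySem.Dict.empty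
  PySem.List.sorted rev.items (fun nt => PySem.Str.len nt.1) true

-- ===== PRECONDITION & SPEC =====
def Spec_build_rev_py (table : List (Int × String)) (out : List (String × Int)) : Prop := out = build_rev_py_alt table
instance (table : List (Int × String)) (out : List (String × Int)) : Decidable (Spec_build_rev_py table out) := by unfold Spec_build_rev_py; infer_instance

-- ===== CLAIM (what is proved, stated in full; the proofs are below) =====
def Claim_equal_build_rev_py : Prop := ∀ (table : List (Int × String)), Dom_build_rev_py table → Spec_build_rev_py table (build_rev_py table)

-- ===== LEMMAS AND PROOFS =====

-- dedup-by-name keeping the first occurrence, the `seen` set threaded exactly like the ports do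
def ddRev (seen : PySem.Set String) : List (String × Int) → List (String × Int)
  | [] => []
  | p :: rest =>
      if PySem.Set.contains seen p.1 then ddRev seen rest
      else p :: ddRev (PySem.Set.add seen p.1) rest

theorem set_contains_eq (s : PySem.Set String) (x : String) :
    PySem.Set.contains s x = decide (x ∈ s) := by
  simp [PySem.Set.contains]

theorem set_add_of_not_mem (s : PySem.Set String) (x : String) (h : x ∉ s) :
    PySem.Set.add s x = s ++ [x] := by
  simp [PySem.Set.add, set_contains_eq, h]

-- ddRev only looks at `seen` through membership of the names it meets
theorem ddRev_congr (l : List (String × Int)) (seen seen' : PySem.Set String)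
    (h : ∀ a ∈ l.map (·.1), (a ∈ seen) ↔ (a ∈ seen')) :
    ddRev seen l = ddRev seen' l := by
  induction l generalizing seen seen' with
  | nil => rfl
  | cons p rest ih =>
      have hp : (p.1 ∈ seen) ↔ (p.1 ∈ seen') := h p.1 (by simp)
      simp only [ddRev, set_contains_eq]
      by_cases hm : p.1 ∈ seen
      · rw [if_pos (by simpa using hm), if_pos (by simpa using hp.mp hm)]
        exact ih _ _ fun a ha => h a (by simp [ha])
      · have hm' : p.1 ∉ seen' := fun c => hm (hp.mpr c)
        rw [if_neg (by simpa using hm), if_neg (by simpa using hm')]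
        refine congrArg _ (ih _ _ fun a ha => ?_)
        simp only [PySem.Set.mem_add]
        rw [h a (by simp [ha])]

theorem ddRev_append (u v : List (String × Int)) (seen : PySem.Set String) :
    ddRev seen (u ++ v) = ddRev seen u ++ ddRev (seen ++ u.map (·.1)) v := by
  induction u generalizing seen with
  | nil => simp [ddRev]
  | cons p rest ih =>
      simp only [List.cons_append, ddRev, set_contains_eq]
      by_cases hm : p.1 ∈ seen
      · rw [if_pos (by simpa using hm), if_pos (by simpa using hm), ih]
        refine congrArg _ (ddRev_congr _ _ _ fun a _ => ?_)
        simp only [List.map_cons, List.mem_append, List.mem_cons]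
        constructor
        · rintro (h1 | h1)
          · exact Or.inl h1
          · exact Or.inr (Or.inr h1)
        · rintro (h1 | h1 | h1)
          · exact Or.inl h1
          · exact h1 ▸ Or.inl hm
          · exact Or.inr h1
      · rw [if_neg (by simpa using hm), if_neg (by simpa using hm),
          set_add_of_not_mem _ _ hm, ih]
        simp [List.append_assoc]

theorem mem_of_mem_ddRev (l : List (String × Int)) (seen : PySem.Set String)
    (b : String × Int) (hb : b ∈ ddRev seen l) : b ∈ l := by
  induction l generalizing seen with
  | nil => simp [ddRev] at hb
  | cons p rest ih =>
      simp only [ddRev] at hb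
      split at hb
      · exact List.mem_cons_of_mem _ (ih _ hb)
      · rcases List.mem_cons.mp hb with h | h
        · simp [h]
        · exact List.mem_cons_of_mem _ (ih _ h)

-- A's loop is ddRev over the swapped pairs
theorem foldA_eq_ddRev (l : List (Int × String)) (seen : PySem.Set String) (out : List (String × Int)) :
    (l.foldl
      (fun (st : PySem.Set String × List (String × Int)) kv =>
        if PySem.Set.contains st.1 kv.2 then st
        else (PySem.Set.add st.1 kv.2, st.2 ++ [(kv.2, kv.1)]))
      (seen, out)).2 = out ++ ddRev seen (l.map (fun kv => (kv.2, kv.1))) := by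
  induction l generalizing seen out with
  | nil => simp [ddRev]
  | cons kv rest ih =>
      simp only [List.foldl_cons, List.map_cons, ddRev]
      cases h : PySem.Set.contains seen kv.2 with
      | true => simp only [h, if_true, if_false, ih]
      | false => simp only [h, Bool.false_eq_true, if_false, ih, List.append_assoc,
          List.singleton_append]

theorem dict_contains_eq (d : PySem.Dict String Int) (k : String) :
    PySem.Dict.contains d k = decide (k ∈ d.keys) := by
  rw [Bool.eq_iff_iff]
  simp only [PySem.Dict.contains, PySem.Dict.keys, List.any_eq_true, List.mem_map,
    beq_iff_eq, decide_eq_true_eq]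

-- B's setdefault loop collects exactly the first occurrences, in order
theorem foldB_eq_ddRev (l : List (Int × String)) (d : PySem.Dict String Int) :
    (l.foldl (fun (d : PySem.Dict String Int) kv => d.setdefault kv.2 kv.1) d).items
      = d.items ++ ddRev d.keys (l.map (fun kv => (kv.2, kv.1))) := by
  induction l generalizing d with
  | nil => simp [ddRev]
  | cons kv rest ih =>
      simp only [List.foldl_cons, List.map_cons, ddRev, set_contains_eq]
      by_cases hm : kv.2 ∈ d.keys
      · have h : PySem.Dict.contains d kv.2 = true := by simp [dict_contains_eq, hm]
        rw [PySem.Dict.setdefault_of_contains d kv.1 h, if_pos (by simpa using hm), ih]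
      · have h : PySem.Dict.contains d kv.2 = false := by simp [dict_contains_eq, hm]
        have hsd : d.setdefault kv.2 kv.1 = PySem.Dict.mk (d.items ++ [(kv.2, kv.1)]) := by
          simp only [PySem.Dict.setdefault, h, Bool.false_eq_true, if_false]
        rw [if_neg (by simpa using hm), ih, hsd]
        have hk : (PySem.Dict.mk (d.items ++ [(kv.2, kv.1)]) : PySem.Dict String Int).keys
            = PySem.Set.add d.keys kv.2 := by
          rw [set_add_of_not_mem _ _ hm]
          simp [PySem.Dict.keys]
        rw [hk]
        simp [List.append_assoc, PySem.Dict.items]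

-- insertBy always splits at the first element x must go before
theorem insertBy_split {α : Type} (bef : α → α → Bool) (x : α) (l : List α) :
    PySem.List.insertBy bef x l
      = l.takeWhile (fun b => !bef x b) ++ x :: l.dropWhile (fun b => !bef x b) := by
  induction l with
  | nil => simp [PySem.List.insertBy]
  | cons y ys ih =>
      cases h : bef x y with
      | true => simp [PySem.List.insertBy, h, List.takeWhile_cons]
      | false => simp [PySem.List.insertBy, h, List.takeWhile_cons, ih]

theorem insertBy_append_left {α : Type} (bef : α → α → Bool) (x : α) (P Q : List α)
    (h : ∀ b ∈ P, bef x b = false) :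
    PySem.List.insertBy bef x (P ++ Q) = P ++ PySem.List.insertBy bef x Q := by
  induction P with
  | nil => simp
  | cons p ps ih =>
      have hp : bef x p = false := h p (by simp)
      simp [PySem.List.insertBy, hp, ih fun b hb => h b (by simp [hb])]

theorem insertBy_cons_of_before {α : Type} (bef : α → α → Bool) (x q : α) (Q : List α)
    (h : bef x q = true) : PySem.List.insertBy bef x (q :: Q) = x :: q :: Q := by
  simp [PySem.List.insertBy, h]

-- every element dropped by takeWhile in a descending list has key strictly below k x
theorem forall_dropWhile_lt {α : Type} (k : α → Int) (x : α) (S : List α)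
    (hp : S.Pairwise (fun a b => k b ≤ k a)) :
    ∀ b ∈ S.dropWhile (fun b => !decide (k b < k x)), k b < k x := by
  induction S with
  | nil => simp
  | cons s S' ih =>
      rcases List.pairwise_cons.mp hp with ⟨hs, hp'⟩
      by_cases h : k s < k x
      case neg =>
          rw [List.dropWhile_cons_of_pos (p := fun b => !decide (k b < k x)) (by simp [h])]
          exact ih hp'
      case pos =>
          rw [List.dropWhile_cons_of_neg (p := fun b => !decide (k b < k x)) (by simp [h])]
          intro b hb
          have hsx : k s < k x := h
          rcases List.mem_cons.mp hb with rfl | hb'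
          · exact hsx
          · exact lt_of_le_of_lt (hs b hb') hsx

-- snoc step of the insertion sort
theorem sorted_rev_snoc {α : Type} (ys : List α) (x : α) (key : α → Int) :
    PySem.List.sorted (ys ++ [x]) key true
      = PySem.List.insertBy (fun a b => decide (key b < key a)) x (PySem.List.sorted ys key true) := by
  rw [PySem.List.sorted_rev_eq_foldl_insertBy, PySem.List.sorted_rev_eq_foldl_insertBy,
    List.foldl_append]
  rfl

-- mapping swap through the sort
theorem insertBy_map_swap (x : Int × String) (l : List (Int × String)) :
    (PySem.List.insertBy (fun a b => decide (PySem.Str.len b.2 < PySem.Str.len a.2)) x l).map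
        (fun kv => (kv.2, kv.1))
      = PySem.List.insertBy (fun a b => decide (PySem.Str.len b.1 < PySem.Str.len a.1))
          (x.2, x.1) (l.map (fun kv => (kv.2, kv.1))) := by
  induction l with
  | nil => simp [PySem.List.insertBy]
  | cons y ys ih =>
      by_cases h : y.2.length < x.2.length
      · simp [PySem.List.insertBy, h]
      · simpa [PySem.List.insertBy, h] using ih

theorem sorted_map_swap (xs : List (Int × String)) :
    (PySem.List.sorted xs (fun kv => PySem.Str.len kv.2) true).map (fun kv => (kv.2, kv.1))
      = PySem.List.sorted (xs.map (fun kv => (kv.2, kv.1))) (fun nt => PySem.Str.len nt.1) true := by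
  induction xs using List.reverseRecOn with
  | nil => simp [PySem.List.sorted]
  | append_singleton ys x ih =>
      rw [sorted_rev_snoc, insertBy_map_swap, ih, List.map_append]
      simp only [List.map_cons, List.map_nil]
      rw [sorted_rev_snoc]

-- specialisations of the split lemmas to the longest-first comparator
theorem insertBy_split_len (x : String × Int) (l : List (String × Int)) :
    PySem.List.insertBy (fun a b => decide (PySem.Str.len b.1 < PySem.Str.len a.1)) x l
      = l.takeWhile (fun b => !decide (PySem.Str.len b.1 < PySem.Str.len x.1))
        ++ x :: l.dropWhile (fun b => !decide (PySem.Str.len b.1 < PySem.Str.len x.1)) := by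
  have h := insertBy_split (α := String × Int)
      (fun a b => decide (PySem.Str.len b.1 < PySem.Str.len a.1)) x l
  exact h

theorem forall_dropWhile_lt_len (x : String × Int) (S : List (String × Int))
    (hp : S.Pairwise (fun a b => PySem.Str.len b.1 ≤ PySem.Str.len a.1)) :
    ∀ b ∈ S.dropWhile (fun b => !decide (PySem.Str.len b.1 < PySem.Str.len x.1)),
      PySem.Str.len b.1 < PySem.Str.len x.1 := by
  have h := @forall_dropWhile_lt (String × Int) (fun nt => PySem.Str.len nt.1) x S hp
  exact h

-- one step of ddRev
theorem ddRev_cons_of_mem (seen : PySem.Set String) (p : String × Int) (l : List (String × Int))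
    (h : p.1 ∈ seen) : ddRev seen (p :: l) = ddRev seen l := by
  simp only [ddRev, set_contains_eq]
  rw [if_pos (by simpa using h)]

theorem ddRev_cons_of_not_mem (seen : PySem.Set String) (p : String × Int) (l : List (String × Int))
    (h : p.1 ∉ seen) : ddRev seen (p :: l) = p :: ddRev (PySem.Set.add seen p.1) l := by
  simp only [ddRev, set_contains_eq]
  rw [if_neg (by simpa using h)]

-- the crux: dedup-by-name commutes with the stable longest-first sort
theorem ddRev_sorted_comm (ys : List (String × Int)) :
    ddRev [] (PySem.List.sorted ys (fun nt => PySem.Str.len nt.1) true)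
      = PySem.List.sorted (ddRev [] ys) (fun nt => PySem.Str.len nt.1) true := by
  induction ys using List.reverseRecOn with
  | nil => simp [PySem.List.sorted, ddRev]
  | append_singleton ys x ih =>
      rw [sorted_rev_snoc, insertBy_split_len]
      have hTD :
          (PySem.List.sorted ys (fun nt => PySem.Str.len nt.1) true).takeWhile
              (fun b => !decide (PySem.Str.len b.1 < PySem.Str.len x.1))
            ++ (PySem.List.sorted ys (fun nt => PySem.Str.len nt.1) true).dropWhile
              (fun b => !decide (PySem.Str.len b.1 < PySem.Str.len x.1))
          = PySem.List.sorted ys (fun nt => PySem.Str.len nt.1) true :=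
        List.takeWhile_append_dropWhile
      set S := PySem.List.sorted ys (fun nt => PySem.Str.len nt.1) true with hS
      set T := S.takeWhile (fun b => !decide (PySem.Str.len b.1 < PySem.Str.len x.1)) with hT
      set D := S.dropWhile (fun b => !decide (PySem.Str.len b.1 < PySem.Str.len x.1)) with hD
      have hpair : S.Pairwise (fun a b => PySem.Str.len b.1 ≤ PySem.Str.len a.1) :=
        PySem.List.sorted_pairwise_rev ys (fun nt => PySem.Str.len nt.1)
      have hDlt : ∀ b ∈ D, PySem.Str.len b.1 < PySem.Str.len x.1 :=
        forall_dropWhile_lt_len x S hpair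
      have hTf : ∀ b ∈ T,
          (fun (a b : String × Int) => decide (PySem.Str.len b.1 < PySem.Str.len a.1)) x b = false := by
        intro b hb
        have := List.mem_takeWhile_imp hb
        simpa using this
      have hmemS : ∀ y, y ∈ S ↔ y ∈ ys := fun y =>
        PySem.List.mem_sorted ys (fun nt => PySem.Str.len nt.1) true y
      have hxT : x.1 ∈ ys.map (·.1) ↔ x.1 ∈ T.map (·.1) := by
        constructor
        · intro hm
          obtain ⟨y, hy, hyx⟩ := List.mem_map.mp hm
          have hyS : y ∈ T ++ D := by rw [hTD]; exact (hmemS y).mpr hy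
          rcases List.mem_append.mp hyS with h1 | h1
          · exact List.mem_map.mpr ⟨y, h1, hyx⟩
          · exact absurd (hDlt y h1) (by rw [hyx]; exact lt_irrefl _)
        · intro hm
          obtain ⟨y, hy, hyx⟩ := List.mem_map.mp hm
          have hyS : y ∈ S := by rw [← hTD]; exact List.mem_append_left _ hy
          exact List.mem_map.mpr ⟨y, (hmemS y).mp hyS, hyx⟩
      have hddS : ddRev [] S = ddRev [] T ++ ddRev (T.map (·.1)) D := by
        rw [← hTD, ddRev_append]; rfl
      rw [ddRev_append T (x :: D) [], List.nil_append]
      by_cases hx : x.1 ∈ ys.map (·.1)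
      · -- x's name was seen before: both sides drop x
        have hxT' : x.1 ∈ T.map (·.1) := hxT.mp hx
        rw [ddRev_cons_of_mem _ _ _ hxT']
        have hys : ddRev [] (ys ++ [x]) = ddRev [] ys := by
          rw [ddRev_append, List.nil_append, ddRev_cons_of_mem _ _ _ hx]
          simp [ddRev]
        rw [hys, ← ih, hddS]
      · -- fresh name: x survives on both sides, in the same slot
        have hxT' : x.1 ∉ T.map (·.1) := fun c => hx (hxT.mpr c)
        have hxD : x.1 ∉ D.map (·.1) := by
          intro c
          obtain ⟨y, hy, hyx⟩ := List.mem_map.mp c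
          exact absurd (hDlt y hy) (by rw [hyx]; exact lt_irrefl _)
        rw [ddRev_cons_of_not_mem _ _ _ hxT', set_add_of_not_mem _ _ hxT']
        have hcongr : ddRev (T.map (·.1) ++ [x.1]) D = ddRev (T.map (·.1)) D := by
          refine ddRev_congr _ _ _ fun a ha => ?_
          have hax : a ≠ x.1 := fun c => hxD (c ▸ ha)
          simp [hax]
        rw [hcongr]
        have hys : ddRev [] (ys ++ [x]) = ddRev [] ys ++ [x] := by
          rw [ddRev_append, List.nil_append, ddRev_cons_of_not_mem _ _ _ hx]
          simp [ddRev]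
        rw [hys, sorted_rev_snoc, ← ih, hddS,
          insertBy_append_left _ x _ _ (fun b hb => hTf b (mem_of_mem_ddRev _ _ _ hb))]
        refine congrArg _ ?_
        cases hc : ddRev (T.map (·.1)) D with
        | nil => simp [PySem.List.insertBy]
        | cons d0 rest =>
            have hd0 : d0 ∈ D := mem_of_mem_ddRev _ _ _ (hc ▸ List.mem_cons_self ..)
            refine (insertBy_cons_of_before _ x d0 rest ?_).symm
            simp only [decide_eq_true_eq]
            exact hDlt d0 hd0

-- ===== VERDICT (by name: the statement is the Claim_ definition above) =====
theorem build_rev_py_spec : Claim_equal_build_rev_py := by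
  intro table _
  unfold Spec_build_rev_py
  simp only [build_rev_py, build_rev_py_alt]
  rw [foldA_eq_ddRev, foldB_eq_ddRev]
  simp only [PySem.Dict.empty, PySem.Dict.keys, PySem.Set.empty, List.nil_append, List.map_nil]
  rw [sorted_map_swap, ddRev_sorted_comm]
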